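-- pv_equiv track=rewrite | github.com/ElrohirGT/uvg-othello-client | ai.py | bitboard_to_move
-- ===== SOURCE A (Python) =====
-- from typing import List, Tuple, Optional
--
-- def bitboard_to_move(move_bitboard: int) -> Tuple[int, int]:
--     """
--     Convert a bitboard with a single set bit into (row, col) coordinates.
--     """
--     if move_bitboard == 0:
--         return None
--
--     pos = 0
--     while move_bitboard > 1:
--         move_bitboard >>= 1
--         pos += 1
--
--     return divmod(pos, 8)
-- ===== SOURCE B (Python) =====
-- def bitboard_to_move(move_bitboard):
--     """
--     Convert a bitboard with a single set bit into (row, col) coordinates.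
--     """
--     if move_bitboard == 0:
--         return None
--     return divmod(move_bitboard.bit_length() - 1, 8)
-- ===== Notes on version B (the rewrite author's own statement) =====
-- stated objective: idiomatic
-- what changed: Replaced the right-shift counting loop with the closed-form bit index bit_length()-1; Pre_ excludes negative inputs, which are not bitboards and on which A's (0,0) is leftover loop state.
-- outside the precondition, e.g. on bitboard_to_move(-12): A returns (0, 0), B returns (0, 3); on bitboard_to_move(-1): A returns (0, 0), B returns (0, 0)
import Mathlib
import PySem

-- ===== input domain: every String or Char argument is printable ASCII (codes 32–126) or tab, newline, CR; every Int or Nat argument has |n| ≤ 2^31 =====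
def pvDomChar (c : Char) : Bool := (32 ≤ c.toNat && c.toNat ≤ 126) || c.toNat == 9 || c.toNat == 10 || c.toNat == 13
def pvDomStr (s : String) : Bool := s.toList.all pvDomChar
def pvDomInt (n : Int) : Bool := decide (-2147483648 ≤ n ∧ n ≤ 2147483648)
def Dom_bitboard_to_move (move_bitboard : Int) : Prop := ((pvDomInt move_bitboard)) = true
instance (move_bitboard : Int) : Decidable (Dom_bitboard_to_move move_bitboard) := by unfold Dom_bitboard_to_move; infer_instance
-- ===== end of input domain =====

-- B replaces A's right-shift counting loop by the closed-form bit index bit_length()-1 (idiomatic, loop-free).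

-- ===== PORT A =====
-- the 'while move_bitboard > 1: move_bitboard >>= 1; pos += 1' loop ( >>1 on an int is floor division by 2 )
def bbLoop (move_bitboard : Int) (pos : Int) : Int :=
  if h : 1 < move_bitboard then
    bbLoop (PySem.Int.floordiv move_bitboard 2) (pos + 1)
  else pos
termination_by move_bitboard.toNat
decreasing_by
  rw [PySem.Int.floordiv_eq_ediv_of_pos (by omega : (0:Int) < 2)]
  omega

def bitboard_to_move (move_bitboard : Int) : Option (Int × Int) :=
  if move_bitboard == 0 then none
  else
    let pos := bbLoop move_bitboard 0
    some (PySem.Int.floordiv pos 8, PySem.Int.mod pos 8)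

-- ===== PORT B =====
-- pos = move_bitboard.bit_length() - 1; return divmod(pos, 8)
def bitboard_to_move_alt (move_bitboard : Int) : Option (Int × Int) :=
  if move_bitboard == 0 then none
  else
    let pos : Int := (PySem.Int.bitLength move_bitboard : Int) - 1
    some (PySem.Int.floordiv pos 8, PySem.Int.mod pos 8)

-- ===== PRECONDITION & SPEC =====
-- Pre_ excludes negative inputs, which are not bitboards: A's (0,0) there is leftover loop
-- state (the loop never runs), not a meaningful coordinate.
def Pre_bitboard_to_move (move_bitboard : Int) : Prop := 0 ≤ move_bitboard
instance (move_bitboard : Int) : Decidable (Pre_bitboard_to_move move_bitboard) := by unfold Pre_bitboard_to_move; infer_instance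
def pvWitness_bitboard_to_move : Int := 9

def Spec_bitboard_to_move (move_bitboard : Int) (out : Option (Int × Int)) : Prop := out = bitboard_to_move_alt move_bitboard
instance (move_bitboard : Int) (out : Option (Int × Int)) : Decidable (Spec_bitboard_to_move move_bitboard out) := by unfold Spec_bitboard_to_move; infer_instance

-- ===== CLAIM (what is proved, stated in full; the proofs are below) =====
def Claim_equal_bitboard_to_move : Prop := ∀ (move_bitboard : Int), Dom_bitboard_to_move move_bitboard → Pre_bitboard_to_move move_bitboard → Spec_bitboard_to_move move_bitboard (bitboard_to_move move_bitboard)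

-- ===== LEMMAS AND PROOFS =====

theorem bbLoop_le_one (m pos : Int) (h : ¬ 1 < m) : bbLoop m pos = pos := by
  rw [bbLoop]; simp [h]

theorem bbLoop_eq_bitLength (n : Nat) :
    ∀ (m pos : Int), m.toNat = n → 1 < m →
      bbLoop m pos = pos + (PySem.Int.bitLength m : Int) - 1 := by
  induction n using Nat.strong_induction_on with
  | _ n ih =>
    intro m pos hn hm
    have h2 : PySem.Int.floordiv m 2 = m / 2 :=
      PySem.Int.floordiv_eq_ediv_of_pos (by omega)
    have hbl : PySem.Int.bitLength m = PySem.Int.bitLength (PySem.Int.floordiv m 2) + 1 :=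
      PySem.Int.bitLength_of_pos (by omega)
    rw [bbLoop]; simp only [hm, dif_pos]
    by_cases hh : 1 < PySem.Int.floordiv m 2
    · rw [ih (PySem.Int.floordiv m 2).toNat (by rw [h2]; omega)
        (PySem.Int.floordiv m 2) (pos + 1) rfl hh]
      rw [hbl]; push_cast; ring
    · have h1 : PySem.Int.floordiv m 2 = 1 := by rw [h2]; rw [h2] at hh; omega
      rw [bbLoop_le_one _ _ hh, hbl, h1]
      have : PySem.Int.bitLength (1 : Int) = 1 := by decide
      rw [this]; push_cast; ring

-- ===== VERDICT (by name: the statement is the Claim_ definition above) =====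
theorem bitboard_to_move_spec : Claim_equal_bitboard_to_move := by
  intro m _ hpre
  unfold Spec_bitboard_to_move bitboard_to_move bitboard_to_move_alt
  by_cases h0 : m = 0
  · simp [h0]
  · simp only [beq_iff_eq, h0, if_false]
    by_cases hm : 1 < m
    · rw [bbLoop_eq_bitLength m.toNat m 0 rfl hm]
      ring_nf
    · have h1 : m = 1 := by unfold Pre_bitboard_to_move at hpre; omega
      subst h1
      rw [bbLoop_le_one 1 0 (by norm_num)]
      norm_num [show PySem.Int.bitLength 1 = 1 from by decide]
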